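-- pv_equiv track=rewrite | github.com/Brayantoro/Tetris | game.py | crear_grid
-- ===== SOURCE A (Python) =====
-- def crear_grid(locked_positions={}):
--     grid = [[(0,0,0) for x in range(10)] for x in range(20)]
--
--     for i in range(len(grid)):
--         for j in range(len(grid[i])):
--             if (j,i) in locked_positions:
--                 c = locked_positions[(j,i)]
--                 grid[i][j] = c
--     return grid
-- ===== SOURCE B (Python) =====
-- def crear_grid(locked_positions={}):
--     grid = [[(0,0,0) for x in range(10)] for x in range(20)]
--     for (x, y), c in locked_positions.items():
--         if 0 <= x < 10 and 0 <= y < 20: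
--             grid[y][x] = c
--     return grid
-- ===== Notes on version B (the rewrite author's own statement) =====
-- stated objective: simpler
-- what changed: Instead of scanning all 200 cells and testing each coordinate for membership in the dict, B iterates once over locked_positions.items() and writes each in-bounds entry directly into the grid; Pre_ excludes association lists with two entries whose equal (x,y) key carries different colors, a shape no Python dict input can have (first-match vs last-write order there is accidental).
import Mathlib
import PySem

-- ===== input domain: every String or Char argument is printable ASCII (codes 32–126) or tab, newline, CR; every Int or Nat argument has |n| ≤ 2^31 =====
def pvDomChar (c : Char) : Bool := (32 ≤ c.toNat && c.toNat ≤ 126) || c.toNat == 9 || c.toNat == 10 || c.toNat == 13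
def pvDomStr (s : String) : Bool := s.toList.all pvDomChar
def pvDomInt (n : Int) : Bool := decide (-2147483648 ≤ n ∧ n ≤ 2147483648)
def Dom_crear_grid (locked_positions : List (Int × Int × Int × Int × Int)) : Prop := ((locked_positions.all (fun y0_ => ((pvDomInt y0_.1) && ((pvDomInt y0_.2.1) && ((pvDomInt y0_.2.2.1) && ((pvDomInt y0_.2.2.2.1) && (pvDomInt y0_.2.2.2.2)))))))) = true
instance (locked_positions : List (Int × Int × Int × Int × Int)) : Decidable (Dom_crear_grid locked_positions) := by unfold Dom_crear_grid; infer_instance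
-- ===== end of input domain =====

-- B iterates over the dict entries and writes them into the grid, instead of A's
-- membership test at every one of the 200 cells.  Equivalence of the RETURN value.

-- ===== PORT A =====
-- dict membership/lookup on the (x,y)-keyed association list: first match wins.
def lookupLP (lp : List (Int × Int × Int × Int × Int)) (x y : Int) : Option (Int × Int × Int) :=
  match lp with
  | [] => none
  | (a, b, v) :: t => if a = x ∧ b = y then some v else lookupLP t x y

def crear_grid (locked_positions : List (Int × Int × Int × Int × Int)) : List (List (Int × Int × Int)) :=
  -- grid = [[(0,0,0) for x in range(10)] for x in range(20)]  (range indices unused, so List.range is exact)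
  let grid := (List.range 20).map (fun _ => (List.range 10).map (fun _ => ((0, 0, 0) : Int × Int × Int)))
  -- for i in range(len(grid)): for j in range(len(grid[i])): if (j,i) in locked: grid[i][j] = locked[(j,i)]
  (List.range grid.length).foldl
    (fun g (i : Nat) =>
      (List.range (g.getD i []).length).foldl
        (fun g' (j : Nat) =>
          match lookupLP locked_positions (j : Int) (i : Int) with
          | some c => g'.set i ((g'.getD i []).set j c)
          | none => g')
        g)
    grid

-- ===== PORT B =====
def crear_grid_alt (locked_positions : List (Int × Int × Int × Int × Int)) : List (List (Int × Int × Int)) :=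
  let grid := (List.range 20).map (fun _ => (List.range 10).map (fun _ => ((0, 0, 0) : Int × Int × Int)))
  -- for (x, y), c in locked_positions.items(): if 0 <= x < 10 and 0 <= y < 20: grid[y][x] = c
  locked_positions.foldl
    (fun g e =>
      if 0 ≤ e.1 ∧ e.1 < 10 ∧ 0 ≤ e.2.1 ∧ e.2.1 < 20 then
        g.set e.2.1.toNat ((g.getD e.2.1.toNat []).set e.1.toNat e.2.2)
      else g)
    grid

-- ===== PRECONDITION & SPEC =====
-- Pre_ excludes association lists containing two entries with the same (x,y) key but
-- different colors: no Python dict input has that shape, and on such lists A's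
-- first-match lookup vs B's last-write are equally accidental orders.
def Pre_crear_grid (locked_positions : List (Int × Int × Int × Int × Int)) : Prop :=
  ∀ a ∈ locked_positions, ∀ b ∈ locked_positions, a.1 = b.1 → a.2.1 = b.2.1 → a = b
instance (locked_positions : List (Int × Int × Int × Int × Int)) : Decidable (Pre_crear_grid locked_positions) := by unfold Pre_crear_grid; infer_instance

def pvWitness_crear_grid : (List (Int × Int × Int × Int × Int)) := [(1, 2, 100, 150, 200), (11, 0, 1, 2, 3)]

def Spec_crear_grid (locked_positions : List (Int × Int × Int × Int × Int)) (out : List (List (Int × Int × Int))) : Prop := out = crear_grid_alt locked_positions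
instance (locked_positions : List (Int × Int × Int × Int × Int)) (out : List (List (Int × Int × Int))) : Decidable (Spec_crear_grid locked_positions out) := by unfold Spec_crear_grid; infer_instance

-- ===== CLAIM (what is proved, stated in full; the proofs are below) =====
def Claim_equal_crear_grid : Prop := ∀ (locked_positions : List (Int × Int × Int × Int × Int)), Dom_crear_grid locked_positions → Pre_crear_grid locked_positions → Spec_crear_grid locked_positions (crear_grid locked_positions)

-- ===== LEMMAS AND PROOFS =====

-- last-match lookup (what B's overwriting fold realises)
def lookupLast (lp : List (Int × Int × Int × Int × Int)) (x y : Int) : Option (Int × Int × Int) :=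
  match lp with
  | [] => none
  | (a, b, v) :: t =>
    match lookupLast t x y with
    | some c => some c
    | none => if a = x ∧ b = y then some v else none

theorem lookupLast_mem {lp : List (Int × Int × Int × Int × Int)} {x y : Int} {c : Int × Int × Int}
    (h : lookupLast lp x y = some c) : ∃ p ∈ lp, p.1 = x ∧ p.2.1 = y ∧ p.2.2 = c := by
  induction lp with
  | nil => simp [lookupLast] at h
  | cons e t ih =>
    obtain ⟨a, b, v⟩ := e
    rw [show lookupLast ((a, b, v) :: t) x y = (match lookupLast t x y with
        | some c => some c
        | none => if a = x ∧ b = y then some v else none) from rfl] at h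
    cases ht : lookupLast t x y with
    | some c' =>
      rw [ht] at h
      simp only [] at h
      obtain ⟨p, hp, hx⟩ := ih (ht.trans h)
      exact ⟨p, List.mem_cons_of_mem _ hp, hx⟩
    | none =>
      rw [ht] at h
      simp only [] at h
      split_ifs at h with hk
      exact ⟨(a, b, v), List.mem_cons_self, hk.1, hk.2, by simpa using h⟩

-- under Pre_ (no conflicting duplicate keys) last match = first match
theorem lookupLast_eq_lookupLP {lp : List (Int × Int × Int × Int × Int)}
    (hpre : Pre_crear_grid lp) (x y : Int) : lookupLast lp x y = lookupLP lp x y := by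
  induction lp with
  | nil => rfl
  | cons e t ih =>
    obtain ⟨a, b, v⟩ := e
    have hpret : Pre_crear_grid t := fun p hp q hq => hpre p (List.mem_cons_of_mem _ hp) q (List.mem_cons_of_mem _ hq)
    rw [show lookupLast ((a, b, v) :: t) x y = (match lookupLast t x y with
        | some c => some c
        | none => if a = x ∧ b = y then some v else none) from rfl,
       show lookupLP ((a, b, v) :: t) x y = (if a = x ∧ b = y then some v else lookupLP t x y) from rfl]
    cases ht : lookupLast t x y with
    | some c =>
      obtain ⟨p, hp, h1, h2, h3⟩ := lookupLast_mem ht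
      split_ifs with hk
      · have heq := hpre p (List.mem_cons_of_mem _ hp) (a, b, v) List.mem_cons_self (by simp [h1, hk.1]) (by simp [h2, hk.2])
        have hv : p.2.2 = v := by rw [heq]
        simp only []
        rw [← h3, hv]
      · simp only []
        rw [← ih hpret, ht]
    | none =>
      split_ifs with hk
      · rfl
      · simp only []
        rw [← ih hpret, ht]

-- ---- A-side characterisation ----

def grid0 : List (List (Int × Int × Int)) :=
  (List.range 20).map (fun _ => (List.range 10).map (fun _ => ((0, 0, 0) : Int × Int × Int)))

def row0 : List (Int × Int × Int) := (List.range 10).map (fun _ => ((0, 0, 0) : Int × Int × Int))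

def rowStep (lp : List (Int × Int × Int × Int × Int)) (i : Nat)
    (r : List (Int × Int × Int)) (j : Nat) : List (Int × Int × Int) :=
  match lookupLP lp (j : Int) (i : Int) with
  | some c => r.set j c
  | none => r

-- the inner loop only touches row i
theorem gridstep_eq (lp : List (Int × Int × Int × Int × Int)) (i : Nat) (L : List Nat)
    (g : List (List (Int × Int × Int))) (hi : i < g.length) :
    L.foldl (fun g' (j : Nat) =>
        match lookupLP lp (j : Int) (i : Int) with
        | some c => g'.set i ((g'.getD i []).set j c)
        | none => g') g
      = g.set i (L.foldl (rowStep lp i) (g.getD i [])) := by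
  induction L generalizing g with
  | nil =>
    simp only [List.foldl_nil]
    rw [List.getD_eq_getElem _ _ hi]
    exact (List.set_getElem_self hi).symm
  | cons j L ih =>
    simp only [List.foldl_cons, rowStep]
    cases hc : lookupLP lp (j : Int) (i : Int) with
    | none => simp only [hc]; exact ih g hi
    | some c =>
      simp only [hc]
      have hi1 : i < (g.set i ((g.getD i []).set j c)).length := by
        simpa using hi
      rw [ih _ hi1]
      rw [List.set_set]
      have : (g.set i ((g.getD i []).set j c)).getD i [] = (g.getD i []).set j c := by
        rw [List.getD_eq_getElem _ _ hi1, List.getElem_set_self]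
      rw [this]

-- the row loop, characterised pointwise
theorem rowfold_props (lp : List (Int × Int × Int × Int × Int)) (i : Nat) (n : Nat)
    (r : List (Int × Int × Int)) (hn : n ≤ r.length) :
    ((List.range n).foldl (rowStep lp i) r).length = r.length ∧
    ∀ j : Nat, ((List.range n).foldl (rowStep lp i) r)[j]? =
      if j < n then some ((lookupLP lp (j : Int) (i : Int)).getD (r.getD j (0, 0, 0)))
      else r[j]? := by
  induction n with
  | zero => simp
  | succ n ih =>
    obtain ⟨ihlen, ihget⟩ := ih (by omega)
    rw [List.range_succ, List.foldl_append]
    simp only [List.foldl_cons, List.foldl_nil, rowStep]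
    have hnr : n < r.length := by omega
    cases hc : lookupLP lp (n : Int) (i : Int) with
    | none =>
      simp only [hc]
      refine ⟨ihlen, fun j => ?_⟩
      rcases Nat.lt_trichotomy j n with h | h | h
      · rw [ihget j, if_pos h, if_pos (by omega)]
      · subst h
        rw [ihget j, if_neg (by omega), if_pos (by omega)]
        simp only [hc, Option.getD_none]
        rw [List.getD_eq_getElem _ _ hnr, List.getElem?_eq_getElem hnr]
      · rw [ihget j, if_neg (by omega), if_neg (by omega)]
    | some c =>
      simp only [hc]
      refine ⟨by simpa using ihlen, fun j => ?_⟩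
      rw [List.getElem?_set]
      rcases Nat.lt_trichotomy j n with h | h | h
      · rw [if_neg (by omega), ihget j, if_pos h, if_pos (by omega)]
      · subst h
        rw [if_pos rfl, if_pos (by omega)]
        simp [ihlen, hnr, hc]
      · rw [if_neg (by omega), ihget j, if_neg (by omega), if_neg (by omega)]

def rowA (lp : List (Int × Int × Int × Int × Int)) (i : Nat) (r : List (Int × Int × Int)) :
    List (Int × Int × Int) :=
  (List.range r.length).foldl (rowStep lp i) r

-- the outer loop: rows are produced independently, in place
theorem outer_props (lp : List (Int × Int × Int × Int × Int)) (n : Nat) (hn : n ≤ 20)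
    (g : List (List (Int × Int × Int))) (hg : g.length = 20) :
    (((List.range n).foldl (fun g (i : Nat) =>
        (List.range ((g.getD i []).length)).foldl
          (fun g' (j : Nat) =>
            match lookupLP lp (j : Int) (i : Int) with
            | some c => g'.set i ((g'.getD i []).set j c)
            | none => g') g) g).length = 20) ∧
    (∀ i : Nat, i < n → ((List.range n).foldl (fun g (i : Nat) =>
        (List.range ((g.getD i []).length)).foldl
          (fun g' (j : Nat) =>
            match lookupLP lp (j : Int) (i : Int) with
            | some c => g'.set i ((g'.getD i []).set j c)
            | none => g') g) g)[i]? = some (rowA lp i (g.getD i []))) ∧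
    (∀ i : Nat, n ≤ i → ((List.range n).foldl (fun g (i : Nat) =>
        (List.range ((g.getD i []).length)).foldl
          (fun g' (j : Nat) =>
            match lookupLP lp (j : Int) (i : Int) with
            | some c => g'.set i ((g'.getD i []).set j c)
            | none => g') g) g)[i]? = g[i]?) := by
  induction n with
  | zero => exact ⟨hg, by omega, fun i _ => rfl⟩
  | succ n ih =>
    obtain ⟨ihlen, ihdone, ihrest⟩ := ih (by omega)
    rw [List.range_succ, List.foldl_append]
    simp only [List.foldl_cons, List.foldl_nil]
    set G := (List.range n).foldl _ g with hG
    have hnG : n < G.length := by omega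
    rw [gridstep_eq lp n _ G hnG]
    have hrow : G.getD n [] = g.getD n [] := by
      rw [List.getD_eq_getElem?_getD, List.getD_eq_getElem?_getD, ihrest n (le_refl n)]
    rw [hrow]
    refine ⟨by simpa using ihlen, fun i hi => ?_, fun i hi => ?_⟩
    · rw [List.getElem?_set]
      rcases Nat.lt_trichotomy i n with h | h | h
      · rw [if_neg (by omega)]; exact ihdone i h
      · subst h
        rw [if_pos rfl, if_pos (by omega : i < G.length)]
        rfl
      · omega
    · rw [List.getElem?_set, if_neg (by omega)]
      exact ihrest i (by omega)

-- grid0 facts (concrete, so decidable)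
theorem grid0_rows : ∀ i : Nat, i < 20 → grid0.getD i [] = row0 := by decide
theorem grid0_len : grid0.length = 20 := by decide
theorem row0_len : row0.length = 10 := by decide
theorem row0_getD : ∀ j : Nat, j < 10 → row0.getD j (0, 0, 0) = (0, 0, 0) := by decide

theorem crear_grid_char (lp : List (Int × Int × Int × Int × Int)) :
    (crear_grid lp).length = 20 ∧
    ∀ i : Nat, i < 20 → (crear_grid lp)[i]? = some (rowA lp i row0) := by
  have h : crear_grid lp = (List.range 20).foldl (fun g (i : Nat) =>
      (List.range ((g.getD i []).length)).foldl
        (fun g' (j : Nat) =>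
          match lookupLP lp (j : Int) (i : Int) with
          | some c => g'.set i ((g'.getD i []).set j c)
          | none => g') g) grid0 := rfl
  obtain ⟨hlen, hdone, _⟩ := outer_props lp 20 (le_refl 20) grid0 grid0_len
  rw [h]
  exact ⟨hlen, fun i hi => by rw [hdone i hi, grid0_rows i hi]⟩

-- ---- B-side characterisation ----

theorem bfold_props (lp : List (Int × Int × Int × Int × Int))
    (g : List (List (Int × Int × Int))) (hg : g.length = 20)
    (hrows : ∀ i : Nat, i < 20 → (g.getD i []).length = 10) :
    ((lp.foldl (fun g e =>
        if 0 ≤ e.1 ∧ e.1 < 10 ∧ 0 ≤ e.2.1 ∧ e.2.1 < 20 then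
          g.set e.2.1.toNat ((g.getD e.2.1.toNat []).set e.1.toNat e.2.2)
        else g) g).length = 20) ∧
    (∀ i : Nat, i < 20 → ((lp.foldl (fun g e =>
        if 0 ≤ e.1 ∧ e.1 < 10 ∧ 0 ≤ e.2.1 ∧ e.2.1 < 20 then
          g.set e.2.1.toNat ((g.getD e.2.1.toNat []).set e.1.toNat e.2.2)
        else g) g).getD i []).length = 10) ∧
    (∀ i j : Nat, i < 20 → j < 10 →
      ((lp.foldl (fun g e =>
        if 0 ≤ e.1 ∧ e.1 < 10 ∧ 0 ≤ e.2.1 ∧ e.2.1 < 20 then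
          g.set e.2.1.toNat ((g.getD e.2.1.toNat []).set e.1.toNat e.2.2)
        else g) g).getD i []).getD j (0, 0, 0)
        = (lookupLast lp (j : Int) (i : Int)).getD ((g.getD i []).getD j (0, 0, 0))) := by
  induction lp generalizing g with
  | nil => exact ⟨hg, hrows, fun i j _ _ => rfl⟩
  | cons e t ih =>
    obtain ⟨x, y, v⟩ := e
    simp only [List.foldl_cons]
    by_cases hb : 0 ≤ x ∧ x < 10 ∧ 0 ≤ y ∧ y < 20
    · rw [if_pos hb]
      set g1 := g.set y.toNat ((g.getD y.toNat []).set x.toNat v) with hg1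
      have hyn : y.toNat < 20 := by omega
      have hxn : x.toNat < 10 := by omega
      have hg1len : g1.length = 20 := by simp [hg1, hg]
      have hrow1 : ∀ i : Nat, i < 20 → g1.getD i [] =
          if i = y.toNat then (g.getD y.toNat []).set x.toNat v else g.getD i [] := by
        intro i hi
        rw [hg1, List.getD_eq_getElem?_getD, List.getElem?_set]
        by_cases h1 : y.toNat = i
        · rw [if_pos h1, if_pos (by omega : y.toNat < g.length), if_pos h1.symm]
          rfl
        · rw [if_neg h1, if_neg (fun hh => h1 hh.symm)]
          exact List.getD_eq_getElem?_getD.symm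
      have hrows1 : ∀ i : Nat, i < 20 → (g1.getD i []).length = 10 := by
        intro i hi
        rw [hrow1 i hi]
        split_ifs with h1
        · rw [List.length_set]; exact hrows y.toNat hyn
        · exact hrows i hi
      obtain ⟨l1, l2, l3⟩ := ih g1 hg1len hrows1
      refine ⟨l1, l2, fun i j hi hj => ?_⟩
      rw [l3 i j hi hj]
      have hcell : (g1.getD i []).getD j (0, 0, 0) =
          if x = (j : Int) ∧ y = (i : Int) then v else (g.getD i []).getD j (0, 0, 0) := by
        rw [hrow1 i hi]
        by_cases hk : x = (j : Int) ∧ y = (i : Int)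
        · have hyi : i = y.toNat := by omega
          have hxj : x.toNat = j := by omega
          rw [if_pos hyi, if_pos hk, ← hyi, ← hxj]
          have hlen : ((g.getD i []).set x.toNat v).length = 10 := by
            rw [List.length_set]; exact hrows i hi
          rw [List.getD_eq_getElem _ _ (by rw [hlen]; omega), List.getElem_set_self]
        · rw [if_neg hk]
          by_cases hyi : i = y.toNat
          · have hxj : x.toNat ≠ j := by
              intro hc
              exact hk ⟨by omega, by omega⟩
            rw [if_pos hyi, hyi]
            rw [List.getD_eq_getElem?_getD, List.getElem?_set, if_neg (by omega),
              ← List.getD_eq_getElem?_getD]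
          · rw [if_neg hyi]
      rw [hcell]
      rw [show lookupLast ((x, y, v) :: t) (j : Int) (i : Int) = (match lookupLast t (j : Int) (i : Int) with
          | some c => some c
          | none => if x = (j : Int) ∧ y = (i : Int) then some v else none) from rfl]
      cases hlt : lookupLast t (j : Int) (i : Int) with
      | some c => rfl
      | none =>
        simp only []
        split_ifs with hk
        · rfl
        · rfl
    · rw [if_neg hb]
      obtain ⟨l1, l2, l3⟩ := ih g hg hrows
      refine ⟨l1, l2, fun i j hi hj => ?_⟩
      rw [l3 i j hi hj]
      rw [show lookupLast ((x, y, v) :: t) (j : Int) (i : Int) = (match lookupLast t (j : Int) (i : Int) with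
          | some c => some c
          | none => if x = (j : Int) ∧ y = (i : Int) then some v else none) from rfl]
      cases hlt : lookupLast t (j : Int) (i : Int) with
      | some c => rfl
      | none =>
        simp only []
        rw [if_neg (by intro hk; exact hb ⟨by omega, by omega, by omega, by omega⟩)]

theorem crear_grid_alt_char (lp : List (Int × Int × Int × Int × Int)) :
    (crear_grid_alt lp).length = 20 ∧
    (∀ i : Nat, i < 20 → ((crear_grid_alt lp).getD i []).length = 10) ∧
    (∀ i j : Nat, i < 20 → j < 10 →
      ((crear_grid_alt lp).getD i []).getD j (0, 0, 0)
        = (lookupLast lp (j : Int) (i : Int)).getD (0, 0, 0)) := by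
  have h : crear_grid_alt lp = lp.foldl (fun g e =>
      if 0 ≤ e.1 ∧ e.1 < 10 ∧ 0 ≤ e.2.1 ∧ e.2.1 < 20 then
        g.set e.2.1.toNat ((g.getD e.2.1.toNat []).set e.1.toNat e.2.2)
      else g) grid0 := rfl
  obtain ⟨l1, l2, l3⟩ := bfold_props lp grid0 grid0_len
    (fun i hi => by rw [grid0_rows i hi]; exact row0_len)
  rw [h]
  refine ⟨l1, l2, fun i j hi hj => ?_⟩
  rw [l3 i j hi hj, grid0_rows i hi, row0_getD j hj]

-- the two characterisations pin down the same grid (stated abstractly to keep terms small)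
theorem grids_eq (lp : List (Int × Int × Int × Int × Int))
    (A B : List (List (Int × Int × Int)))
    (hpre : Pre_crear_grid lp)
    (hArow : ∀ i : Nat, i < 20 → A[i]? = some (rowA lp i row0))
    (hAlen : A.length = 20)
    (hBlen : B.length = 20)
    (hBrows : ∀ i : Nat, i < 20 → (B.getD i []).length = 10)
    (hBcell : ∀ i j : Nat, i < 20 → j < 10 →
      (B.getD i []).getD j (0, 0, 0) = (lookupLast lp (j : Int) (i : Int)).getD (0, 0, 0)) :
    A = B := by
  apply List.ext_getElem?
  intro i
  by_cases hi : i < 20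
  · rw [hArow i hi]
    have hib : i < B.length := by omega
    rw [List.getElem?_eq_getElem hib]
    congr 1
    have hrowb : B[i] = B.getD i [] := (List.getD_eq_getElem _ _ hib).symm
    rw [hrowb]
    have hrwA : rowA lp i row0 = (List.range 10).foldl (rowStep lp i) row0 := by
      unfold rowA; rw [row0_len]
    obtain ⟨hAlen', hAget⟩ := rowfold_props lp i 10 row0 (by rw [row0_len])
    apply List.ext_getElem?
    intro j
    by_cases hj : j < 10
    · rw [hrwA, hAget j, if_pos hj, row0_getD j hj]
      have hjb : j < (B.getD i []).length := by rw [hBrows i hi]; exact hj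
      rw [List.getElem?_eq_getElem hjb]
      rw [show (B.getD i [])[j] = (B.getD i []).getD j (0, 0, 0) from
        (List.getD_eq_getElem _ _ hjb).symm]
      rw [hBcell i j hi hj, lookupLast_eq_lookupLP hpre]
    · rw [hrwA, hAget j, if_neg hj]
      rw [List.getElem?_eq_none (by rw [row0_len]; omega),
        List.getElem?_eq_none (by rw [hBrows i hi]; omega)]
  · rw [List.getElem?_eq_none (by omega), List.getElem?_eq_none (by omega)]

-- ===== VERDICT (by name: the statement is the Claim_ definition above) =====
theorem crear_grid_spec : Claim_equal_crear_grid := by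
  intro lp _ hpre
  unfold Spec_crear_grid
  obtain ⟨halen, harow⟩ := crear_grid_char lp
  obtain ⟨hblen, hbrows, hbcell⟩ := crear_grid_alt_char lp
  exact grids_eq lp _ _ hpre harow halen hblen hbrows hbcell
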